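-- pv_equiv track=rewrite | github.com/ToolsForHumans/padre | padre/handlers/openstack.py | _force_exact
-- ===== SOURCE A (Python) =====
-- def _force_exact(thing):
--     # This is likely not (fully) comprehensive but should at least escape
--     # most of what we would be getting to hit mysql REGEXP... (we should
--     # really make it possible to tell nova to do exact searches via
--     # a REST api param).
--     #
--     # NOTE: the | symbol is not currently in this list since it appears
--     # nova at a low low level will escape this already (and if we escape
--     # it here, then nova will double escape it and that would not result
--     # in the correct query); this is weird and someone should fix this
--     # upstream (since afaik its not known unless u read the code).
--     #
--     # See: nova/db/sqlalchemy/api.py (_safe_regex_mysql function).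
--     for ch in ["^", "$", ".", "(", ")",
--                "[", "]", "+", "?", "{", "}", "-", "*"]:
--         ch_loc = thing.find(ch)
--         if ch_loc == -1:
--             continue
--         thing = thing.replace(ch, "\\" + ch)
--     # We don't want regex searching enabled, so for certain fields we
--     # want to ensure they force exact matches (as much as we can).
--     return "^" + thing + "$"
-- ===== SOURCE B (Python) =====
-- _SPECIALS = "^$.()[]+?{}-*"
--
--
-- def _force_exact(thing):
--     # Build the result back-to-front in one pass: walk the characters in
--     # reverse, prepending (via append + final reverse) each character and,
--     # for a metacharacter, its backslash; anchors are added as plain chars.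
--     out = ['$']
--     for c in reversed(thing):
--         out.append(c)
--         if c in _SPECIALS:
--             out.append('\\')
--     out.append('^')
--     out.reverse()
--     return ''.join(out)
-- ===== Notes on version B (the rewrite author's own statement) =====
-- stated objective: alternative
-- what changed: Instead of 13 sequential find/replace passes over the whole string, B builds the escaped result in a single back-to-front pass over the characters with an accumulator list (appending the char and, for metacharacters, a backslash, then reversing once).
import Mathlib
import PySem

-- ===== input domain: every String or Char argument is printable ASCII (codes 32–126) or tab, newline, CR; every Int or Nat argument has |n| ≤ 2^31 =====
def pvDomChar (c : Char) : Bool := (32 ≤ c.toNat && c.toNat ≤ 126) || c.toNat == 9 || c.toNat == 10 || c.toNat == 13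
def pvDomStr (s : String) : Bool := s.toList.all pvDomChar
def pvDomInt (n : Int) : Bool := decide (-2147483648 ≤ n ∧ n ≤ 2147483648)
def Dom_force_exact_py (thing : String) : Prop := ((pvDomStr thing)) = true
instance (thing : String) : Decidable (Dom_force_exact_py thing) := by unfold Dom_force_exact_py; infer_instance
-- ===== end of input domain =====

-- B builds the escaped result in one back-to-front pass with an accumulator
-- instead of A's 13 sequential find/replace passes; same return value.

-- ===== PORT A =====
-- the literal list of escape characters A loops over
def aSpecials : List Char :=
  ['^', '$', '.', '(', ')', '[', ']', '+', '?', '{', '}', '-', '*']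

-- one iteration of A's for-loop: skip if find == -1, else replace ch by "\\"+ch
def aStep (t : List Char) (ch : Char) : List Char :=
  if PySem.Chars.find t [ch] = -1 then t
  else PySem.Chars.replace t [ch] ['\\', ch]

def force_exact_py (thing : String) : String :=
  String.ofList ('^' :: (aSpecials.foldl aStep thing.toList) ++ ['$'])

-- ===== PORT B =====
-- the string constant _SPECIALS B tests membership in
def bSpecials : List Char := "^$.()[]+?{}-*".toList

-- one iteration of B's loop over reversed(thing): out.append(c); if special,
-- out.append('\\'); the accumulator here is out in its final (reversed) order
def bStep (out : List Char) (c : Char) : List Char :=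
  if bSpecials.contains c then '\\' :: c :: out else c :: out

def force_exact_py_alt (thing : String) : String :=
  String.ofList ('^' :: thing.toList.reverse.foldl bStep ['$'])

-- ===== PRECONDITION & SPEC =====
def Spec_force_exact_py (thing : String) (out : String) : Prop := out = force_exact_py_alt thing
instance (thing : String) (out : String) : Decidable (Spec_force_exact_py thing out) := by unfold Spec_force_exact_py; infer_instance

-- ===== CLAIM (what is proved, stated in full; the proofs are below) =====
def Claim_equal_force_exact_py : Prop := ∀ (thing : String), Dom_force_exact_py thing → Spec_force_exact_py thing (force_exact_py thing)

-- ===== LEMMAS AND PROOFS =====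

-- escaping by the set of characters processed so far
def escBy (L : List Char) (c : Char) : List Char :=
  if c ∈ L then ['\\', c] else [c]

-- single-char replace is a pointwise flatMap
theorem replace_go_single (ch : Char) (new : List Char) :
    ∀ (l acc : List Char) (fuel : Nat), l.length ≤ fuel →
      PySem.Chars.replace.go [ch] new fuel l acc
        = acc.reverse ++ l.flatMap (fun c => if c = ch then new else [c]) := by
  intro l
  induction l with
  | nil =>
      intro acc fuel _
      cases fuel <;> simp [PySem.Chars.replace.go]
  | cons c t ih =>
      intro acc fuel hf
      cases fuel with
      | zero => simp at hf
      | succ fuel =>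
        by_cases hc : c = ch
        · subst hc
          simp [PySem.Chars.replace.go, List.isPrefixOf,
                ih (new.reverse ++ acc) fuel (by simpa using hf)]
        · simp only [PySem.Chars.replace.go, List.isPrefixOf,
                ih (c :: acc) fuel (by simpa using hf)]
          rw [if_neg (by simp [Ne.symm hc])]
          simp [if_neg hc]

theorem replace_single (ch : Char) (new : List Char) (s : List Char) :
    PySem.Chars.replace s [ch] new
      = s.flatMap (fun c => if c = ch then new else [c]) := by
  simp [PySem.Chars.replace, replace_go_single ch new s [] s.length le_rfl]

-- if ch is absent, the pointwise escape of ch is the identity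
theorem flatMap_esc_not_mem (ch : Char) (new : List Char) (s : List Char)
    (h : ch ∉ s) :
    s.flatMap (fun c => if c = ch then new else [c]) = s := by
  induction s with
  | nil => rfl
  | cons c t ih =>
      simp only [List.mem_cons, not_or] at h
      simp [List.flatMap_cons, Ne.symm h.1, ih h.2]

-- one iteration of A's loop is the pointwise escape of ch (both branches)
theorem aStep_eq (t : List Char) (ch : Char) :
    aStep t ch = t.flatMap (fun c => if c = ch then ['\\', ch] else [c]) := by
  unfold aStep
  split_ifs with h
  · rw [flatMap_esc_not_mem]
    intro hm
    rw [PySem.Chars.find_eq_neg_one_iff] at h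
    exact h ((List.singleton_infix_iff ch t).mpr hm)
  · exact replace_single ch _ t

-- A's whole loop escapes each character by the set of specials, in one pass
theorem foldl_aStep (L : List Char) :
    ∀ (s : List Char), L.Nodup → '\\' ∉ L →
      L.foldl aStep s = s.flatMap (escBy L) := by
  induction L with
  | nil =>
      intro s _ _
      simp only [List.foldl_nil]
      unfold escBy
      simp only [List.not_mem_nil, if_false]
      exact (List.flatMap_singleton' s).symm
  | cons ch L ih =>
      intro s hnd hbs
      simp only [List.mem_cons, not_or] at hbs
      have hchL : ch ∉ L := (List.nodup_cons.mp hnd).1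
      rw [List.foldl_cons, aStep_eq,
          ih _ (List.nodup_cons.mp hnd).2 hbs.2, List.flatMap_assoc]
      refine List.flatMap_congr (fun c _ => ?_)
      by_cases hc : c = ch
      · subst hc
        simp [escBy, hbs.2, hchL]
      · simp [escBy, hc]

-- B's back-to-front loop computes the pointwise escape followed by the tail
theorem foldl_bStep :
    ∀ (l acc : List Char),
      l.reverse.foldl bStep acc = l.flatMap (escBy aSpecials) ++ acc := by
  intro l
  induction l with
  | nil => intro acc; rfl
  | cons c t ih =>
      intro acc
      have hmem : bSpecials.contains c = decide (c ∈ aSpecials) := by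
        simp [List.contains_eq_mem, bSpecials, aSpecials]
      simp only [List.reverse_cons, List.foldl_append, List.foldl_cons,
        List.foldl_nil, ih, bStep, hmem, List.flatMap_cons, escBy]
      by_cases hc : c ∈ aSpecials <;> simp [hc]

-- ===== VERDICT (by name: the statement is the Claim_ definition above) =====
theorem force_exact_py_spec : Claim_equal_force_exact_py := by
  intro thing _
  unfold Spec_force_exact_py force_exact_py force_exact_py_alt
  rw [foldl_aStep aSpecials thing.toList (by decide) (by decide),
      foldl_bStep thing.toList ['$']]
  simp
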